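-- pv_equiv track=rewrite | github.com/N0urDEV/LeapYear-Explorer | bissextile.py | annees_bissextiles
-- ===== SOURCE A (Python) =====
-- def est_bissextile(annee):
--     if (annee % 4 == 0 and annee % 100 != 0) or (annee % 400 == 0):
--         return True
--     else:
--         return False
--
-- def annees_bissextiles(siecle):
--     annee_debut = (siecle - 1) * 100
--     annee_fin = siecle * 100 - 1
--
--     bissextiles = []
--     for annee in range(annee_debut, annee_fin + 1):
--         if est_bissextile(annee):
--             bissextiles.append(annee)
--
--     return bissextiles
-- ===== SOURCE B (Python) =====
-- def annees_bissextiles(siecle):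
--     debut = (siecle - 1) * 100
--     annees = list(range(debut, debut + 100, 4))
--     if debut % 400 != 0:
--         annees = annees[1:]
--     return annees
-- ===== Notes on version B (the rewrite author's own statement) =====
-- stated objective: alternative
-- what changed: B generates only every fourth year of the century with a strided range and drops the leading century year iff it is non-leap, instead of running the leap-year predicate on each year of the century.
import Mathlib
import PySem

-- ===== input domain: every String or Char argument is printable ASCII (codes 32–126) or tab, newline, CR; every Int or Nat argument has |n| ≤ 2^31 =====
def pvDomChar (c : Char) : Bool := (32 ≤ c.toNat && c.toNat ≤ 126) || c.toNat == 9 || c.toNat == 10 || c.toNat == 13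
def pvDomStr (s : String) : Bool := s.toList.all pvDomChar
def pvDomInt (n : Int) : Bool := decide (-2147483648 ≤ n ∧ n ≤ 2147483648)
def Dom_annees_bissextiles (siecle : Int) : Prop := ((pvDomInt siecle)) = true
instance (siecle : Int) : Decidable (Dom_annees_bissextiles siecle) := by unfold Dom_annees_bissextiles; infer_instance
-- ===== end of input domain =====

-- B generates only every fourth year of the century with a strided range and drops the
-- leading century year iff it is non-leap, instead of testing each year with the predicate.

-- ===== PORT A =====
def est_bissextile (annee : Int) : Bool :=
  if (PySem.Int.mod annee 4 == 0 && !(PySem.Int.mod annee 100 == 0)) || PySem.Int.mod annee 400 == 0 then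
    true
  else
    false

def annees_bissextiles (siecle : Int) : List Int :=
  let annee_debut := (siecle - 1) * 100
  let annee_fin := siecle * 100 - 1
  (PySem.List.pyRange annee_debut (annee_fin + 1) 1).foldl
    (fun bissextiles annee => if est_bissextile annee then bissextiles ++ [annee] else bissextiles) []

-- ===== PORT B =====
def annees_bissextiles_alt (siecle : Int) : List Int :=
  let debut := (siecle - 1) * 100
  let annees := PySem.List.pyRange debut (debut + 100) 4
  if PySem.Int.mod debut 400 ≠ 0 then PySem.List.slice annees (some 1) none else annees

-- ===== PRECONDITION & SPEC =====
def Spec_annees_bissextiles (siecle : Int) (out : List Int) : Prop := out = annees_bissextiles_alt siecle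
instance (siecle : Int) (out : List Int) : Decidable (Spec_annees_bissextiles siecle out) := by unfold Spec_annees_bissextiles; infer_instance

-- ===== CLAIM (what is proved, stated in full; the proofs are below) =====
def Claim_equal_annees_bissextiles : Prop := ∀ (siecle : Int), Dom_annees_bissextiles siecle → Spec_annees_bissextiles siecle (annees_bissextiles siecle)

-- ===== LEMMAS AND PROOFS =====

-- the leap test on the years of the century, as a function of the offset k and of debut % 400
theorem est_bissextile_offset (d : Int) (k : Nat) (hd : d % 100 = 0) (hk : k < 100) :
    est_bissextile (d + k) = (if k = 0 then decide (d % 400 = 0) else decide (k % 4 = 0)) := by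
  have h4 : (0:Int) < 4 := by norm_num
  have h100 : (0:Int) < 100 := by norm_num
  have h400 : (0:Int) < 400 := by norm_num
  simp only [est_bissextile, PySem.Int.mod_eq_emod_of_pos h4, PySem.Int.mod_eq_emod_of_pos h100,
    PySem.Int.mod_eq_emod_of_pos h400]
  split_ifs with h hk0 hk0 <;> simp_all <;> omega

theorem range100_filter_leap : (List.range 100).filter (fun k => decide (k % 4 = 0))
    = (List.range 25).map (fun k => 4 * k) := by decide

theorem range100_filter_nonzero : (List.range 100).filter (fun k => decide (k ≠ 0 ∧ k % 4 = 0))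
    = (List.range 24).map (fun k => 4 * (k + 1)) := by decide

theorem range25_drop_one : (List.range 25).drop 1 = (List.range 24).map (fun k => k + 1) := by decide

theorem annees_bissextiles_eq_filter (siecle : Int) :
    annees_bissextiles siecle =
      ((List.range 100).filter (fun (k : Nat) => est_bissextile ((siecle - 1) * 100 + (k : Int)))).map
        (fun (k : Nat) => (siecle - 1) * 100 + (k : Int)) := by
  have hb : siecle * 100 - 1 + 1 = (siecle - 1) * 100 + 100 := by ring
  have hlen : ((siecle - 1) * 100 + 100 - (siecle - 1) * 100).toNat = 100 := by omega
  simp only [annees_bissextiles, hb, PySem.List.pyRange_one, hlen,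
    PySem.List.foldl_append_if_eq_filter, List.nil_append, List.filter_map]
  rfl

theorem annees_bissextiles_alt_eq (siecle : Int) :
    annees_bissextiles_alt siecle =
      (if (siecle - 1) * 100 % 400 ≠ 0 then
        ((List.range 25).map (fun (k : Nat) => (siecle - 1) * 100 + 4 * (k : Int))).drop 1
      else (List.range 25).map (fun (k : Nat) => (siecle - 1) * 100 + 4 * (k : Int))) := by
  have hs : (0:Int) < 4 := by norm_num
  have h400 : (0:Int) < 400 := by norm_num
  have hr : PySem.List.pyRange ((siecle - 1) * 100) ((siecle - 1) * 100 + 100) 4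
      = (List.range 25).map (fun (k : Nat) => (siecle - 1) * 100 + 4 * (k : Int)) := by
    rw [PySem.List.pyRange_of_pos _ _ hs]
    have hlt : (siecle - 1) * 100 < (siecle - 1) * 100 + 100 := by omega
    simp [hlt]
  simp only [annees_bissextiles_alt, hr, PySem.Int.mod_eq_emod_of_pos h400]
  split_ifs with h
  · rw [PySem.List.slice_from _ (by norm_num)]
    norm_num
  · rfl

-- ===== VERDICT (by name: the statement is the Claim_ definition above) =====
theorem annees_bissextiles_spec : Claim_equal_annees_bissextiles := by
  intro siecle _
  unfold Spec_annees_bissextiles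
  set d : Int := (siecle - 1) * 100 with hd
  have hd100 : d % 100 = 0 := by omega
  rw [annees_bissextiles_eq_filter, annees_bissextiles_alt_eq]
  have hfc : (List.range 100).filter (fun (k : Nat) => est_bissextile (d + (k : Int)))
      = (List.range 100).filter (fun (k : Nat) => if k = 0 then decide (d % 400 = 0) else decide (k % 4 = 0)) := by
    apply List.filter_congr
    intro k hk
    exact est_bissextile_offset d k hd100 (List.mem_range.mp hk)
  rw [← hd, hfc]
  by_cases h400 : d % 400 = 0
  · have : (List.range 100).filter (fun (k : Nat) => if k = 0 then decide (d % 400 = 0) else decide (k % 4 = 0))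
        = (List.range 100).filter (fun k => decide (k % 4 = 0)) := by
      apply List.filter_congr
      intro k _
      by_cases hk0 : k = 0 <;> simp [hk0, h400]
    rw [this, range100_filter_leap, if_neg (by omega : ¬ d % 400 ≠ 0), List.map_map]
    apply List.map_congr_left
    intro k _
    simp
  · have : (List.range 100).filter (fun (k : Nat) => if k = 0 then decide (d % 400 = 0) else decide (k % 4 = 0))
        = (List.range 100).filter (fun k => decide (k ≠ 0 ∧ k % 4 = 0)) := by
      apply List.filter_congr
      intro k _
      by_cases hk0 : k = 0 <;> simp [hk0, h400]
    rw [this, range100_filter_nonzero, if_pos (by omega : d % 400 ≠ 0),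
      ← List.map_drop, range25_drop_one, List.map_map, List.map_map]
    apply List.map_congr_left
    intro k _
    simp
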